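-- pv_equiv track=rewrite | github.com/gamasenninn/lprintsv | app/stocktake/tools/rfid_bar_tool.py | find_closest_9999_codes
-- ===== SOURCE A (Python) =====
-- def find_closest_9999_codes(code_data, reverse=False):
--     closest_codes_dict = {}
--     last_9999_code = None
--     special_9999_code = None
--
--     iter_data = list(reversed(code_data)) if reverse else list(code_data)
--
--     for code in iter_data:
--         if code.startswith("9999"):
--             special_9999_code = code
--             break
--         # 9999で始まるコードが見つからなかったら、空の辞書を返す
--     if special_9999_code is None:
--         return {}
--
--     for code in iter_data:
--         if code.startswith("9999"):
--             last_9999_code = code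
--         else:
--             closest_codes_dict[code] = last_9999_code if last_9999_code else special_9999_code
--
--     return closest_codes_dict
-- ===== SOURCE B (Python) =====
-- def find_closest_9999_codes(code_data, reverse=False):
--     iter_data = reversed(code_data) if reverse else code_data
--     result = {}
--     last_9999 = None
--     pending = []
--     for code in iter_data:
--         if code.startswith("9999"):
--             if last_9999 is None:
--                 for p in pending:
--                     result[p] = code
--             last_9999 = code
--         else:
--             if last_9999 is None:
--                 pending.append(code)
--             else:
--                 result[code] = last_9999
--     return result
-- ===== Notes on version B (the rewrite author's own statement) =====
-- stated objective: alternative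
-- what changed: single pass with a pending buffer flushed at the first 9999-code, replacing A's separate pre-scan for the first 9999-code followed by a full second pass
import Mathlib
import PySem

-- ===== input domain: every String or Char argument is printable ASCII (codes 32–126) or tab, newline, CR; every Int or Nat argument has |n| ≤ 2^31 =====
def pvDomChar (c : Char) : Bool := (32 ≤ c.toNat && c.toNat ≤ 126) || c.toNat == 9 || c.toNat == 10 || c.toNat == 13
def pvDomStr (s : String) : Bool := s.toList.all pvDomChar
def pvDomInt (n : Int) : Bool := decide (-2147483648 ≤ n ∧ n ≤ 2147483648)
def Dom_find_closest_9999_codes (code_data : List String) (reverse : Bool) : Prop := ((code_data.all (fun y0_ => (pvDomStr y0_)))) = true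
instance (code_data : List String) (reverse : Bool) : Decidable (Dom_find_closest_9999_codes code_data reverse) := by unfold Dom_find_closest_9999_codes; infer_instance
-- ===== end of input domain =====

-- B replaces A's pre-scan for the first 9999-code plus a second full pass by one
-- pass with a pending buffer flushed at the first 9999-code (same return value).

-- ===== PORT A =====
-- first loop of A: scan for the first code starting with "9999" (break → stop)
def fcA_findSpecial : List String → Option String
  | [] => none
  | c :: rest => if PySem.Str.startswith c "9999" then some c else fcA_findSpecial rest

-- second loop of A: last_9999_code is the Option state; the inserted value is
-- `last_9999_code if last_9999_code else special` (truthiness: empty string is falsy)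
def fcA_loop (special : String) : List String → Option String → PySem.Dict String String → PySem.Dict String String
  | [], _, d => d
  | c :: rest, last, d =>
    if PySem.Str.startswith c "9999" then fcA_loop special rest (some c) d
    else fcA_loop special rest last
      (d.insert c (match last with
        | some l => if l = "" then special else l
        | none => special))

-- iter_data = list(reversed(code_data)) if reverse else list(code_data), written inline
def find_closest_9999_codes (code_data : List String) (reverse : Bool) : List (String × String) :=
  match fcA_findSpecial (if reverse then code_data.reverse else code_data) with
  | none => []
  | some special =>
    (fcA_loop special (if reverse then code_data.reverse else code_data) none PySem.Dict.empty).items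

-- ===== PORT B =====
-- single loop of B: state = (last_9999 : Option, pending buffer, result dict)
def fcB_loop : List String → Option String → List String → PySem.Dict String String → PySem.Dict String String
  | [], _, _, d => d
  | c :: rest, last, pending, d =>
    if PySem.Str.startswith c "9999" then
      match last with
      | none => fcB_loop rest (some c) pending (pending.foldl (fun d' p => d'.insert p c) d)
      | some _ => fcB_loop rest (some c) pending d
    else
      match last with
      | none => fcB_loop rest none (pending ++ [c]) d
      | some l => fcB_loop rest (some l) pending (d.insert c l)

def find_closest_9999_codes_alt (code_data : List String) (reverse : Bool) : List (String × String) :=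
  (fcB_loop (if reverse then code_data.reverse else code_data) none [] PySem.Dict.empty).items

-- ===== PRECONDITION & SPEC =====
def Spec_find_closest_9999_codes (code_data : List String) (reverse : Bool) (out : List (String × String)) : Prop := out = find_closest_9999_codes_alt code_data reverse
instance (code_data : List String) (reverse : Bool) (out : List (String × String)) : Decidable (Spec_find_closest_9999_codes code_data reverse out) := by unfold Spec_find_closest_9999_codes; infer_instance

-- ===== CLAIM (what is proved, stated in full; the proofs are below) =====
def Claim_equal_find_closest_9999_codes : Prop := ∀ (code_data : List String) (reverse : Bool), Dom_find_closest_9999_codes code_data reverse → Spec_find_closest_9999_codes code_data reverse (find_closest_9999_codes code_data reverse)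

-- ===== LEMMAS AND PROOFS =====

-- a code that startswith "9999" is nonempty
theorem fc_startswith_ne_empty {c : String} (h : PySem.Str.startswith c "9999" = true) : c ≠ "" := by
  intro he; subst he; exact absurd h (by decide)

-- after the first 9999-code both loops coincide: A's `last = some lc` (lc nonempty)
-- inserts lc, B's post-phase inserts lc; pending and special are irrelevant.
theorem fc_post (l : List String) : ∀ (sp lc : String) (pending : List String)
    (d : PySem.Dict String String), lc ≠ "" →
    fcA_loop sp l (some lc) d = fcB_loop l (some lc) pending d := by
  induction l with
  | nil => intro sp lc pending d _; rfl
  | cons c rest ih =>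
    intro sp lc pending d hlc
    by_cases hc : PySem.Str.startswith c "9999" = true
    · simp only [fcA_loop, fcB_loop, hc, if_pos]
      exact ih sp c pending d (fc_startswith_ne_empty hc)
    · simp only [fcA_loop, fcB_loop, hc, if_neg, Bool.false_eq_true, not_false_iff,
        if_neg hlc]
      exact ih sp lc pending _ hlc

-- pre-phase: while no 9999-code was seen, A (with last = none) inserts codes with
-- the pre-scanned special code immediately, B buffers them; A's dict equals B's
-- dict with the buffer flushed with value sp (sp = first 9999-code of l).
theorem fc_pre (l : List String) : ∀ (sp : String) (pending : List String)
    (d : PySem.Dict String String), fcA_findSpecial l = some sp →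
    fcA_loop sp l none (pending.foldl (fun d' p => d'.insert p sp) d)
      = fcB_loop l none pending d := by
  induction l with
  | nil => intro sp pending d h; simp [fcA_findSpecial] at h
  | cons c rest ih =>
    intro sp pending d h
    by_cases hc : PySem.Str.startswith c "9999" = true
    · have hsp : c = sp := by
        rw [fcA_findSpecial, if_pos hc] at h; exact Option.some.inj h
      subst hsp
      simp only [fcA_loop, fcB_loop, hc, if_pos]
      exact fc_post rest c c pending _ (fc_startswith_ne_empty hc)
    · have h' : fcA_findSpecial rest = some sp := by
        rw [fcA_findSpecial, if_neg hc] at h; exact h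
      simp only [fcA_loop, fcB_loop, hc, if_neg, Bool.false_eq_true, not_false_iff]
      have := ih sp (pending ++ [c]) d h'
      simpa [List.foldl_append] using this
-- if l contains no 9999-code, B's loop never leaves the pre-phase and its dict stays empty
theorem fc_none (l : List String) : ∀ (pending : List String),
    fcA_findSpecial l = none → fcB_loop l none pending PySem.Dict.empty = PySem.Dict.empty := by
  induction l with
  | nil => intro pending _; rfl
  | cons c rest ih =>
    intro pending h
    by_cases hc : PySem.Str.startswith c "9999" = true
    · rw [fcA_findSpecial, if_pos hc] at h
      exact absurd h (by simp)
    · have h' : fcA_findSpecial rest = none := by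
        rw [fcA_findSpecial, if_neg hc] at h; exact h
      simp only [fcB_loop, hc, if_neg, Bool.false_eq_true, not_false_iff]
      exact ih (pending ++ [c]) h'

-- ===== VERDICT (by name: the statement is the Claim_ definition above) =====
theorem find_closest_9999_codes_spec : Claim_equal_find_closest_9999_codes := by
  intro code_data reverse _
  unfold Spec_find_closest_9999_codes find_closest_9999_codes find_closest_9999_codes_alt
  set iter := if reverse = true then code_data.reverse else code_data with hiter
  cases hs : fcA_findSpecial iter with
  | none =>
    rw [fc_none iter [] hs]; rfl
  | some sp =>
    have := fc_pre iter sp [] PySem.Dict.empty hs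
    simp only [List.foldl_nil] at this
    show (fcA_loop sp iter none PySem.Dict.empty).items = _
    exact congrArg PySem.Dict.items this
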